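-- pv_equiv track=rewrite | github.com/moonthree/TIL | practice/homework/python_homework/6/worksjop/6_c.py | lonely
-- ===== SOURCE A (Python) =====
-- def lonely(nums):
--     lonely_nums = []
--     for i in range(len(nums)-1):
--         if nums[i] != nums[i+1]:
--             lonely_nums.append(nums[i])
--     if nums[-1] == nums[-2]:
--         lonely_nums.append(nums[-1])
--     return lonely_nums
-- ===== SOURCE B (Python) =====
-- from itertools import groupby
--
--
-- def lonely(nums):
--     runs = [list(g) for _, g in groupby(nums)]
--     result = [run[-1] for run in runs[:-1]]
--     if len(runs[-1]) > 1:
--         result.append(nums[-1])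
--     return result
-- ===== Notes on version B (the rewrite author's own statement) =====
-- stated objective: idiomatic
-- what changed: Replaces the adjacent-index scan over range(len(nums)-1) with a grouped traversal: build maximal runs of equal values with itertools.groupby, emit the last element of every run but the final one, and append the last element when the final run has length > 1.
import Mathlib
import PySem

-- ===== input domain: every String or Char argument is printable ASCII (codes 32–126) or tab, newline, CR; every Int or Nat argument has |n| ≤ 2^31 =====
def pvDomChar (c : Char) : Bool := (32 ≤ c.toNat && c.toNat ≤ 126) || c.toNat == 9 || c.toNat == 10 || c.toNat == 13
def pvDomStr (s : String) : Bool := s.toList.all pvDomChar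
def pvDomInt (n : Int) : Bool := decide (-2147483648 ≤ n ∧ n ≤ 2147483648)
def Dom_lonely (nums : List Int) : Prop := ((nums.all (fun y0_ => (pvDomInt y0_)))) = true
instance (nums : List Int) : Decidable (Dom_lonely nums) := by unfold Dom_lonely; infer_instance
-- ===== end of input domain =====

-- B replaces A's adjacent-index scan with a grouped traversal over the maximal runs of equal
-- values (itertools.groupby): emit each run's last element except for the final run, then
-- append the last element when the final run has length > 1 (objective: idiomatic).

-- ===== PORT A =====
def lonely (nums : List Int) : List Int :=
  let lonely_nums : List Int :=
    (PySem.List.pyRange 0 ((nums.length : Int) - 1) 1).foldl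
      (fun acc i =>
        if PySem.List.pyGetD nums i 0 ≠ PySem.List.pyGetD nums (i + 1) 0 then
          acc ++ [PySem.List.pyGetD nums i 0]
        else acc) []
  if PySem.List.pyGetD nums (-1) 0 = PySem.List.pyGetD nums (-2) 0 then
    lonely_nums ++ [PySem.List.pyGetD nums (-1) 0]
  else lonely_nums

-- ===== PORT B =====
-- port of itertools.groupby on a list of ints: the maximal runs of equal adjacent values
def runsOf : List Int → List (List Int)
  | [] => []
  | x :: xs =>
    match runsOf xs with
    | [] => [[x]]
    | [] :: rest => [x] :: rest
    | (y :: ys) :: rest => if x = y then (x :: y :: ys) :: rest else [x] :: (y :: ys) :: rest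

def lonely_alt (nums : List Int) : List Int :=
  let runs := runsOf nums
  let result := runs.dropLast.map (fun run => PySem.List.pyGetD run (-1) 0)  -- [run[-1] for run in runs[:-1]]
  if 1 < (PySem.List.pyGetD runs (-1) ([] : List Int)).length then            -- if len(runs[-1]) > 1:
    result ++ [PySem.List.pyGetD nums (-1) 0]                                 --   result.append(nums[-1])
  else result

-- ===== PRECONDITION & SPEC =====
-- A raises IndexError on lists of length < 2 (nums[-1] / nums[-2]); Pre_ excludes exactly those.
def Pre_lonely (nums : List Int) : Prop := 2 ≤ nums.length
instance (nums : List Int) : Decidable (Pre_lonely nums) := by unfold Pre_lonely; infer_instance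
def pvWitness_lonely : List Int := ([1, 1, 2] : List Int)

def Spec_lonely (nums : List Int) (out : List Int) : Prop := out = lonely_alt nums
instance (nums : List Int) (out : List Int) : Decidable (Spec_lonely nums out) := by unfold Spec_lonely; infer_instance

-- ===== CLAIM (what is proved, stated in full; the proofs are below) =====
def Claim_equal_lonely : Prop := ∀ (nums : List Int), Dom_lonely nums → Pre_lonely nums → Spec_lonely nums (lonely nums)

-- ===== LEMMAS AND PROOFS =====

-- the value of A's loop: each element that differs from its successor
def core : List Int → List Int
  | x :: y :: rest => (if x ≠ y then [x] else []) ++ core (y :: rest)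
  | _ => []

-- the common recursive shape both programs compute on lists of length ≥ 2
def adjSpec : List Int → List Int
  | [x, y] => if x ≠ y then [x] else [y]
  | x :: y :: z :: rs => (if x ≠ y then [x] else []) ++ adjSpec (y :: z :: rs)
  | _ => []

lemma core_range (nums : List Int) :
    ((List.range (nums.length - 1)).filter
        (fun k => decide (nums.getD k 0 ≠ nums.getD (k + 1) 0))).map (fun k => nums.getD k 0)
      = core nums := by
  match nums with
  | [] => simp [core]
  | [x] => simp [core]
  | x :: y :: rest =>
    have ih := core_range (y :: rest)
    simp only [List.length_cons, Nat.add_sub_cancel, List.getD, decide_not,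
      List.getElem?_cons_succ] at ih
    simp only [List.length_cons, Nat.add_sub_cancel]
    rw [List.range_succ_eq_map]
    simp only [List.filter_cons, List.filter_map, List.getD, Function.comp_def,
      Nat.succ_eq_add_one, List.getElem?_cons_zero, List.getElem?_cons_succ,
      Option.getD_some, decide_not]
    by_cases hxy : x = y
    · subst hxy
      rw [if_neg (by simp), List.map_map]
      have hc : core (x :: x :: rest) = core (x :: rest) := by simp [core]
      rw [hc]
      exact (List.map_congr_left (fun a _ => by simp [Nat.succ_eq_add_one])).trans ih
    · rw [if_pos (by simp [hxy]), List.map_cons, List.map_map]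
      have hc : core (x :: y :: rest) = x :: core (y :: rest) := by simp [core, hxy]
      rw [hc]
      simp only [List.getElem?_cons_zero, Option.getD_some]
      exact congrArg (List.cons x)
        ((List.map_congr_left (fun a _ => by simp [Nat.succ_eq_add_one])).trans ih)

lemma A_loop_eq (nums : List Int) :
    (PySem.List.pyRange 0 ((nums.length : Int) - 1) 1).foldl
      (fun acc i =>
        if PySem.List.pyGetD nums i 0 ≠ PySem.List.pyGetD nums (i + 1) 0 then
          acc ++ [PySem.List.pyGetD nums i 0]
        else acc) [] = core nums := by
  have hbody : (fun (acc : List Int) (i : Int) =>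
      if PySem.List.pyGetD nums i 0 ≠ PySem.List.pyGetD nums (i + 1) 0 then
        acc ++ [PySem.List.pyGetD nums i 0] else acc)
      = (fun (acc : List Int) (i : Int) =>
      if (decide (PySem.List.pyGetD nums i 0 ≠ PySem.List.pyGetD nums (i + 1) 0)) = true then
        acc ++ [PySem.List.pyGetD nums i 0] else acc) := by
    funext acc i; simp only [decide_eq_true_eq]
  rw [hbody, PySem.List.foldl_append_if (p := fun i => decide (PySem.List.pyGetD nums i 0 ≠ PySem.List.pyGetD nums (i + 1) 0)) (f := fun i => PySem.List.pyGetD nums i 0)]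
  rw [PySem.List.pyRange_one]
  have hlen : ((nums.length : Int) - 1 - 0).toNat = nums.length - 1 := by omega
  rw [hlen, List.filter_map, List.map_map]
  rw [← core_range nums]
  rw [List.nil_append]
  refine congrArg₂ List.map ?_ ?_
  · funext k; simp [Function.comp, PySem.List.pyGetD_natCast]
  · refine List.filter_congr ?_
    intro k _
    simp only [Function.comp, zero_add]
    have h2 : (k : Int) + 1 = (((k + 1 : Nat)) : Int) := by omega
    rw [h2]
    simp only [PySem.List.pyGetD_natCast]

lemma pyGetD_neg_one_cons {α : Type} (x : α) (tl : List α) (d : α) (h : tl ≠ []) :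
    PySem.List.pyGetD (x :: tl) (-1) d = PySem.List.pyGetD tl (-1) d := by
  rw [PySem.List.pyGetD_neg_one _ _ (List.cons_ne_nil x tl), PySem.List.pyGetD_neg_one _ _ h,
    List.getLast_cons h]

lemma pyGetD_neg_two_cons (x : Int) (tl : List Int) (h : 2 ≤ tl.length) :
    PySem.List.pyGetD (x :: tl) (-2) 0 = PySem.List.pyGetD tl (-2) 0 := by
  rw [PySem.List.pyGetD_neg_ofNat (x :: tl) 2 0 (by omega) (by simp; omega),
    PySem.List.pyGetD_neg_ofNat tl 2 0 (by omega) h]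
  rw [List.getElem_cons]
  rw [dif_neg (by simp; omega)]
  apply getElem_congr rfl
  simp
  omega

lemma lonely_eq_core (nums : List Int) :
    lonely nums = core nums ++
      (if PySem.List.pyGetD nums (-1) 0 = PySem.List.pyGetD nums (-2) 0 then
        [PySem.List.pyGetD nums (-1) 0] else []) := by
  simp only [lonely]
  rw [A_loop_eq]
  split_ifs <;> simp

lemma A_eq_adjSpec (nums : List Int) (h : 2 ≤ nums.length) : lonely nums = adjSpec nums := by
  match nums with
  | [x, y] =>
    rw [lonely_eq_core]
    have h1 : PySem.List.pyGetD [x, y] (-1) 0 = y := by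
      rw [PySem.List.pyGetD_neg_one _ _ (by simp)]; rfl
    have h2 : PySem.List.pyGetD [x, y] (-2) 0 = x := by
      rw [PySem.List.pyGetD_neg_ofNat _ 2 0 (by omega) (by simp)]; rfl
    rw [h1, h2]
    by_cases hxy : x = y
    · simp [core, adjSpec, hxy]
    · simp [core, adjSpec, hxy, Ne.symm hxy]
  | x :: y :: z :: rs =>
    have ih := A_eq_adjSpec (y :: z :: rs) (by simp)
    rw [lonely_eq_core] at ih ⊢
    rw [pyGetD_neg_one_cons x _ 0 (by simp), pyGetD_neg_two_cons x _ (by simp)]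
    have hcore : core (x :: y :: z :: rs) = (if x ≠ y then [x] else []) ++ core (y :: z :: rs) := rfl
    rw [hcore, List.append_assoc, ih]
    rfl

lemma runsOf_flatten (l : List Int) : (runsOf l).flatten = l := by
  induction l with
  | nil => rfl
  | cons x xs ih =>
    rw [runsOf]
    match hr : runsOf xs with
    | [] => simp_all
    | [] :: rest => simp_all
    | (y :: ys) :: rest =>
      rw [hr] at ih
      by_cases hxy : x = y <;> simp_all

lemma runsOf_head (x : Int) (xs : List Int) :
    ∃ ys rest, runsOf (x :: xs) = (x :: ys) :: rest := by
  induction xs generalizing x with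
  | nil => exact ⟨[], [], rfl⟩
  | cons z zs ih =>
    obtain ⟨ys, rest, hr⟩ := ih z
    rw [runsOf, hr]
    by_cases hxz : x = z
    · exact ⟨z :: ys, rest, by simp [hxz]⟩
    · exact ⟨[], (z :: ys) :: rest, by simp [hxz]⟩

lemma B_eq_adjSpec (nums : List Int) (h : 2 ≤ nums.length) : lonely_alt nums = adjSpec nums := by
  match nums with
  | [x, y] =>
    by_cases hxy : x = y
    · subst hxy
      simp [lonely_alt, runsOf, adjSpec]
      rw [PySem.List.pyGetD_neg_one ([[x, x]]) _ (by simp),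
          PySem.List.pyGetD_neg_one ([x, x]) _ (by simp)]
      simp [List.getLast]
    · simp [lonely_alt, runsOf, adjSpec, hxy]
      rw [PySem.List.pyGetD_neg_one ([[x], [y]]) _ (by simp)]
      simp [List.getLast]
      rw [PySem.List.pyGetD_neg_one ([x]) _ (by simp)]
      simp [List.getLast]
  | x :: y :: z :: rs =>
    have ih := B_eq_adjSpec (y :: z :: rs) (by simp)
    obtain ⟨ys, rest, hr⟩ := runsOf_head y (z :: rs)
    have hstep : lonely_alt (x :: y :: z :: rs)
        = (if x ≠ y then [x] else []) ++ lonely_alt (y :: z :: rs) := by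
      have hrx : runsOf (x :: y :: z :: rs)
          = (if x = y then (x :: y :: ys) :: rest else [x] :: (y :: ys) :: rest) := by
        rw [runsOf, hr]
      have hnegx : PySem.List.pyGetD (x :: y :: z :: rs) (-1) 0
          = PySem.List.pyGetD (y :: z :: rs) (-1) 0 := pyGetD_neg_one_cons x _ 0 (by simp)
      by_cases hxy : x = y
      · rw [if_pos hxy] at hrx
        rw [if_neg (by simp [hxy])]
        simp only [lonely_alt, hrx, hr, hnegx, List.nil_append]
        cases rest with
        | nil =>
          have hflat := runsOf_flatten (y :: z :: rs)
          rw [hr] at hflat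
          simp at hflat
          rw [PySem.List.pyGetD_neg_one ([x :: y :: ys]) _ (by simp),
              PySem.List.pyGetD_neg_one ([y :: ys]) _ (by simp)]
          simp only [List.getLast_singleton]
          rw [if_pos (by simp), if_pos (by simp [hflat])]
          simp [List.dropLast]
        | cons r rs' =>
          rw [PySem.List.pyGetD_neg_one ((x :: y :: ys) :: r :: rs') _ (by simp),
              PySem.List.pyGetD_neg_one ((y :: ys) :: r :: rs') _ (by simp),
              List.getLast_cons (a := x :: y :: ys) (by simp),
              List.getLast_cons (a := y :: ys) (by simp)]
          simp only [List.dropLast_cons₂, List.map_cons]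
          rw [pyGetD_neg_one_cons x (y :: ys) 0 (by simp)]
      · rw [if_neg hxy] at hrx
        rw [if_pos (by simp [hxy])]
        simp only [lonely_alt, hrx, hr, hnegx]
        rw [PySem.List.pyGetD_neg_one ([x] :: (y :: ys) :: rest) _ (by simp),
            List.getLast_cons (a := [x]) (by simp),
            PySem.List.pyGetD_neg_one ((y :: ys) :: rest) _ (by simp)]
        simp only [List.dropLast_cons₂, List.map_cons]
        have hx1 : PySem.List.pyGetD [x] (-1) 0 = x := by
          rw [PySem.List.pyGetD_neg_one _ _ (by simp)]; rfl
        rw [hx1]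
        split_ifs <;> simp
    rw [hstep, ih]
    rfl

-- ===== VERDICT (by name: the statement is the Claim_ definition above) =====
theorem lonely_spec : Claim_equal_lonely := by
  intro nums _ hpre
  show lonely nums = lonely_alt nums
  rw [A_eq_adjSpec nums hpre, B_eq_adjSpec nums hpre]
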